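-- pv_equiv track=rewrite | github.com/huyeet/Learn_Using_Git | Advent_Of_Code/day_six_part_two.py | intersect_pancake
-- ===== SOURCE A (Python) =====
-- def intersect_pancake(letter: str, list_answers: list, index: int, main_list: list):
--     if letter in list_answers:
--         if index < len(main_list) - 1:
--             return intersect_pancake(letter, main_list[index + 1], index + 1, main_list)
--         elif index == len(main_list) - 1:
--             return 1
--     elif letter not in list_answers:
--         return
-- ===== SOURCE B (Python) =====
-- def intersect_pancake(letter: str, list_answers: list, index: int, main_list: list):
--     if letter not in list_answers:
--         return None
--     if index > len(main_list) - 1: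
--         return None
--     if all(letter in group for group in main_list[index + 1:]):
--         return 1
--     return None
-- ===== Notes on version B (the rewrite author's own statement) =====
-- stated objective: simpler
-- what changed: Replaces A's tail recursion that re-enters itself with each successive group as list_answers by a flat guard sequence plus one all() over the slice main_list[index+1:].
-- outside the precondition, e.g. on intersect_pancake('a', ['a'], -2, [['a'], ['a'], ['a']]): A returns 1, B returns 1; on intersect_pancake('a', ['a'], -3, [['b'], ['a'], ['a']]): A returns None, B returns 1
import Mathlib
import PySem

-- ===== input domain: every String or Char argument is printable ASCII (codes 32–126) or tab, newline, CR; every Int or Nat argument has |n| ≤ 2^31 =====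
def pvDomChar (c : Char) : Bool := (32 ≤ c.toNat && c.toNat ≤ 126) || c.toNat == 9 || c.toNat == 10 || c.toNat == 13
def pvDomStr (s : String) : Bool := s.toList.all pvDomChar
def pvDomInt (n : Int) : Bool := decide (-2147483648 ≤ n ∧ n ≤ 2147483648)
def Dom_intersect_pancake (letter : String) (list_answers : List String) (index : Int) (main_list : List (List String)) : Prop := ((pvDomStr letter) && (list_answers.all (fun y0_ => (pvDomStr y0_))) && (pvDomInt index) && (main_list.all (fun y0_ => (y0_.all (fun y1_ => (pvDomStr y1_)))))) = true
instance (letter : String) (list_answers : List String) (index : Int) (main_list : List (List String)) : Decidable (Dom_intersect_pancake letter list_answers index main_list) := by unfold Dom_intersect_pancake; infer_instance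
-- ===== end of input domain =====

-- B replaces A's tail recursion through successive groups by guard checks plus one all() over the slice main_list[index+1:] (objective: simpler).
set_option maxRecDepth 8000


-- ===== PORT A =====
def intersect_pancake (letter : String) (list_answers : List String) (index : Int) (main_list : List (List String)) : Option Int :=
  if list_answers.contains letter then
    if index < (main_list.length : Int) - 1 then
      match PySem.List.pyGet? main_list (index + 1) with
      | some nxt => intersect_pancake letter nxt (index + 1) main_list
      | none => none   -- IndexError in Python; unreachable inside Pre_
    else if index = (main_list.length : Int) - 1 then some 1
    else none
  else none
termination_by ((main_list.length : Int) - 1 - index).toNat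
decreasing_by omega

-- ===== PORT B =====
def intersect_pancake_alt (letter : String) (list_answers : List String) (index : Int) (main_list : List (List String)) : Option Int :=
  if ¬ list_answers.contains letter then none
  else if index > (main_list.length : Int) - 1 then none
  else if (PySem.List.slice main_list (some (index + 1)) none).all (fun group => group.contains letter) then some 1
  else none

-- ===== PRECONDITION & SPEC =====
-- Pre_ restricts to the natural domain: when the letter is present, index must be a nonnegative
-- position in main_list — for negative index Python A either raises (IndexError / RecursionError
-- from unbounded recursion) or returns a value through accidental negative-index wraparound,
-- which B's slice does not reproduce. (When the letter is absent both return None immediately,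
-- so any index is admitted then.)
def Pre_intersect_pancake (letter : String) (list_answers : List String) (index : Int) (main_list : List (List String)) : Prop := letter ∈ list_answers → 0 ≤ index
instance (letter : String) (list_answers : List String) (index : Int) (main_list : List (List String)) : Decidable (Pre_intersect_pancake letter list_answers index main_list) := by unfold Pre_intersect_pancake; infer_instance

def pvWitness_intersect_pancake : String × List String × Int × List (List String) := ("a", ["a", "b"], 0, [["b"], ["a"], ["a", "c"]])

def Spec_intersect_pancake (letter : String) (list_answers : List String) (index : Int) (main_list : List (List String)) (out : Option Int) : Prop := out = intersect_pancake_alt letter list_answers index main_list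
instance (letter : String) (list_answers : List String) (index : Int) (main_list : List (List String)) (out : Option Int) : Decidable (Spec_intersect_pancake letter list_answers index main_list out) := by unfold Spec_intersect_pancake; infer_instance

-- ===== CLAIM (what is proved, stated in full; the proofs are below) =====
def Claim_equal_intersect_pancake : Prop := ∀ (letter : String) (list_answers : List String) (index : Int) (main_list : List (List String)), Dom_intersect_pancake letter list_answers index main_list → Pre_intersect_pancake letter list_answers index main_list → Spec_intersect_pancake letter list_answers index main_list (intersect_pancake letter list_answers index main_list)

-- ===== LEMMAS AND PROOFS =====

-- A and B agree at every natural-number index; strong induction on main_list.length - i.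
lemma intersect_pancake_eq_alt_nat (letter : String) (main_list : List (List String)) :
    ∀ (i : Nat) (list_answers : List String),
      intersect_pancake letter list_answers (i : Int) main_list
        = intersect_pancake_alt letter list_answers (i : Int) main_list := by
  intro i
  induction hk : main_list.length - i using Nat.strong_induction_on generalizing i with
  | _ k IH =>
  intro la
  by_cases hmem : letter ∈ la
  · unfold intersect_pancake intersect_pancake_alt
    by_cases hlt : (i : Int) < (main_list.length : Int) - 1
    · have hidx : i + 1 < main_list.length := by omega
      have hc1 : ((i : Int) + 1) = ((i + 1 : Nat) : Int) := by push_cast; ring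
      have hc2 : ((i : Int) + 1 + 1) = ((i + 2 : Nat) : Int) := by push_cast; ring
      have hget : PySem.List.pyGet? main_list ((i : Int) + 1)
          = some main_list[i + 1] := by
        rw [hc1, PySem.List.pyGet?_natCast, List.getElem?_eq_getElem hidx]
      have hrec : intersect_pancake letter main_list[i + 1] ((i : Int) + 1) main_list
          = intersect_pancake_alt letter main_list[i + 1] ((i : Int) + 1) main_list := by
        have := IH (main_list.length - (i + 1)) (by omega) (i + 1) rfl main_list[i + 1]
        rw [hc1]; exact this
      rw [if_pos (by simpa using hmem), if_pos hlt, hget]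
      show intersect_pancake letter main_list[i + 1] ((i : Int) + 1) main_list = _
      rw [hrec]
      unfold intersect_pancake_alt
      have hs1 : PySem.List.slice main_list (some ((i : Int) + 1)) none
          = main_list.drop (i + 1) := by
        rw [hc1]; exact PySem.List.slice_from_natCast main_list (i + 1)
      have hs2 : PySem.List.slice main_list (some ((i : Int) + 1 + 1)) none
          = main_list.drop (i + 2) := by
        rw [hc2]; exact PySem.List.slice_from_natCast main_list (i + 2)
      rw [hs1, hs2]
      have hdrop : main_list.drop (i + 1) = main_list[i + 1] :: main_list.drop (i + 2) :=
        List.drop_eq_getElem_cons hidx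
      have hngt : ¬ ((i : Int) > (main_list.length : Int) - 1) := by omega
      have hngt' : ¬ ((i : Int) + 1 > (main_list.length : Int) - 1) := by omega
      have hcl : la.contains letter = true := by simpa using hmem
      by_cases hnmem : letter ∈ main_list[i + 1]
      · have hct : (main_list[i + 1]).contains letter = true := by simpa using hnmem
        simp only [hcl, hct, hdrop, List.all_cons, Bool.true_and, not_true, if_false]
        rw [if_neg hngt', if_neg hngt]
      · have hct : (main_list[i + 1]).contains letter = false := by simpa using hnmem
        simp only [hcl, hct, hdrop, List.all_cons, Bool.false_and, Bool.false_eq_true,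
          not_false_iff, not_true, if_false, if_true, ite_self]
    · -- index ≥ len - 1 : either exactly the last index (slice empty → all true) or past the end
      rw [if_pos (by simpa using hmem), if_neg hlt]
      by_cases heq : (i : Int) = (main_list.length : Int) - 1
      · have hs : PySem.List.slice main_list (some ((i : Int) + 1)) none
            = main_list.drop (i + 1) := by
          have hc : ((i : Int) + 1) = ((i + 1 : Nat) : Int) := by push_cast; ring
          rw [hc]; exact PySem.List.slice_from_natCast main_list (i + 1)
        have hngt : ¬ ((i : Int) > (main_list.length : Int) - 1) := by omega
        rw [if_pos heq, hs, List.drop_eq_nil_of_le (by omega)]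
        simp [hmem, hngt]
      · have hgt : (i : Int) > (main_list.length : Int) - 1 := by omega
        rw [if_neg heq]
        simp [hmem, hgt]
  · unfold intersect_pancake intersect_pancake_alt
    simp [hmem]

-- ===== VERDICT (by name: the statement is the Claim_ definition above) =====
theorem intersect_pancake_spec : Claim_equal_intersect_pancake := by
  intro letter la index ml _ hpre
  unfold Spec_intersect_pancake
  by_cases hmem : letter ∈ la
  · have h : index = ((index.toNat : Nat) : Int) := by
      have : (0 : Int) ≤ index := hpre hmem
      omega
    rw [h]
    exact intersect_pancake_eq_alt_nat letter ml index.toNat la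
  · unfold intersect_pancake intersect_pancake_alt
    simp [hmem]
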